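-- pv_equiv track=rewrite | github.com/big-unibo/llm4dfm-develop | llm4dfm/pipeline/metrics.py | count_nodes_with_multiple_incoming_edges
-- ===== SOURCE A (Python) =====
-- def get_key_from_node_to_avoid_order(node):
--     attr_list = [attr.lower() for attr in node.split(',')]
--     attr_list.sort()
--     return ''.join(attr_list)
--
-- def count_nodes_with_multiple_incoming_edges(graph):
--     nodes_incoming_edges_count = dict()
--
--     for edge in graph:
--         to_key = get_key_from_node_to_avoid_order(edge['to'])
--
--         if to_key in nodes_incoming_edges_count:
--             nodes_incoming_edges_count[to_key] += 1
--         else: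
--             nodes_incoming_edges_count[to_key] = 1
--
--     count = sum(1 for value in nodes_incoming_edges_count.values() if value > 1)
--
--     return count
-- ===== SOURCE B (Python) =====
-- def get_key_from_node_to_avoid_order(node):
--     attr_list = [attr.lower() for attr in node.split(',')]
--     attr_list.sort()
--     return ''.join(attr_list)
--
-- def _count_runs(keys):
--     # keys is sorted; count maximal runs of equal elements with length > 1
--     if not keys:
--         return 0
--     x = keys[0]
--     rest = keys[1:]
--     i = 0
--     while i < len(rest) and rest[i] == x:
--         i += 1
--     return (1 if i > 0 else 0) + _count_runs(rest[i:])
--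
-- def count_nodes_with_multiple_incoming_edges(graph):
--     keys = sorted(get_key_from_node_to_avoid_order(edge['to']) for edge in graph)
--     return _count_runs(keys)
-- ===== Notes on version B (the rewrite author's own statement) =====
-- stated objective: alternative
-- what changed: Replaces the per-key counter dictionary and the final scan of its values by sorting the list of normalized target keys and counting maximal runs of equal keys of length > 1.
import Mathlib
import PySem

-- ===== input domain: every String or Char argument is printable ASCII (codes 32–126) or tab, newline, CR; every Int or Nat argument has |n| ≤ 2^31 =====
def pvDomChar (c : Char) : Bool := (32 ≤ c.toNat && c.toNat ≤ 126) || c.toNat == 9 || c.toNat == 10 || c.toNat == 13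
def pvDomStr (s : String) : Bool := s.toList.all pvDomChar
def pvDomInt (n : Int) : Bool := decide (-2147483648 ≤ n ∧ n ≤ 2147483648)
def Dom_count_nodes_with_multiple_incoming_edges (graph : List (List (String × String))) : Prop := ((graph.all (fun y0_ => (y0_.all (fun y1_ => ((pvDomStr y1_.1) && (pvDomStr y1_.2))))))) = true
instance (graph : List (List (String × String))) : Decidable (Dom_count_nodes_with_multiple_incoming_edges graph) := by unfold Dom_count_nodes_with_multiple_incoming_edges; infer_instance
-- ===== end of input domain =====

-- B replaces A's per-key counter dict (and the scan of its values) by sorting the normalized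
-- target keys and counting maximal runs of equal keys of length > 1 (objective: alternative).

-- ===== PORT A =====
-- shared helper, identical in both Python sources
def get_key_from_node_to_avoid_order (node : String) : String :=
  -- sep "," is nonempty, so Python's split never raises and split? is some
  let attr_list := ((PySem.Str.split? node ",").getD []).map (fun attr => PySem.Str.lower attr)
  let attr_list := PySem.List.sorted attr_list (fun x => x) false
  PySem.Str.join "" attr_list

def count_nodes_with_multiple_incoming_edges (graph : List (List (String × String))) : Int :=
  let nodes_incoming_edges_count :=
    graph.foldl (fun d edge =>
      let to_key := get_key_from_node_to_avoid_order ((PySem.Dict.ofList edge).getD "to" "")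
      if d.contains to_key then d.modify to_key 0 (· + 1) else d.insert to_key 1)
      (PySem.Dict.empty : PySem.Dict String Int)
  (nodes_incoming_edges_count.values.map (fun v => if v > 1 then (1 : Int) else 0)).sum

-- ===== PORT B =====
-- _count_runs: the while-scan of equal heads is rest.takeWhile, the tail slice rest[i:] is rest.dropWhile
def pvCountRuns : List String → Int
  | [] => 0
  | x :: rest =>
    let run := rest.takeWhile (fun y => y == x)
    (if 0 < run.length then (1 : Int) else 0) + pvCountRuns (rest.dropWhile (fun y => y == x))
termination_by l => l.length
decreasing_by
  have := List.length_dropWhile_le (fun y => y == x) rest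
  simp only [List.length_cons]; omega

def count_nodes_with_multiple_incoming_edges_alt (graph : List (List (String × String))) : Int :=
  let keys := PySem.List.sorted
    (graph.map (fun edge => get_key_from_node_to_avoid_order ((PySem.Dict.ofList edge).getD "to" "")))
    (fun x => x) false
  pvCountRuns keys

-- ===== PRECONDITION & SPEC =====
-- Pre_ excludes edges without a "to" key, on which the Python A (and B) raises KeyError.
def Pre_count_nodes_with_multiple_incoming_edges (graph : List (List (String × String))) : Prop :=
  ∀ e ∈ graph, "to" ∈ e.map Prod.fst
instance (graph : List (List (String × String))) : Decidable (Pre_count_nodes_with_multiple_incoming_edges graph) := by unfold Pre_count_nodes_with_multiple_incoming_edges; infer_instance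

def pvWitness_count_nodes_with_multiple_incoming_edges : (List (List (String × String))) :=
  [[("to", "a,B")], [("to", "b,A")], [("to", "c")]]

def Spec_count_nodes_with_multiple_incoming_edges (graph : List (List (String × String))) (out : Int) : Prop := out = count_nodes_with_multiple_incoming_edges_alt graph
instance (graph : List (List (String × String))) (out : Int) : Decidable (Spec_count_nodes_with_multiple_incoming_edges graph out) := by unfold Spec_count_nodes_with_multiple_incoming_edges; infer_instance

-- ===== CLAIM (what is proved, stated in full; the proofs are below) =====
def Claim_equal_count_nodes_with_multiple_incoming_edges : Prop := ∀ (graph : List (List (String × String))), Dom_count_nodes_with_multiple_incoming_edges graph → Pre_count_nodes_with_multiple_incoming_edges graph → Spec_count_nodes_with_multiple_incoming_edges graph (count_nodes_with_multiple_incoming_edges graph)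

-- ===== LEMMAS AND PROOFS =====

-- A's branching update is exactly the unconditional counter update
lemma pvStep_eq_modify (d : PySem.Dict String Int) (k : String) :
    (if d.contains k then d.modify k 0 (· + 1) else d.insert k 1) = d.modify k 0 (· + 1) := by
  by_cases h : d.contains k = true
  · simp [h]
  · have h' : d.contains k = false := by simpa using h
    simp [h', PySem.Dict.modify, PySem.Dict.getD_of_not_contains d 0 h']

-- A's result counts the distinct keys that occur more than once
lemma pvA_eq_countP (ks : List String) :
    ((PySem.Dict.counter ks).values.map (fun v => if v > 1 then (1 : Int) else 0)).sum
      = ((PySem.Set.ofList ks).countP (fun k => decide (1 < ks.count k)) : Int) := by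
  have hv : (PySem.Dict.counter ks).values = (PySem.Set.ofList ks).map (fun k => (List.count k ks : Int)) := by
    show (PySem.Dict.counter ks).items.map (·.2) = _
    rw [PySem.Dict.items_counter, List.map_map]
    rfl
  rw [hv, List.map_map]
  have hcg : ((PySem.Set.ofList ks).map ((fun v => if v > 1 then (1 : Int) else 0) ∘ fun k => (List.count k ks : Int)))
      = (PySem.Set.ofList ks).map (fun k => if (fun k => decide (1 < ks.count k)) k = true then (1 : Int) else 0) := by
    refine List.map_congr_left (fun k _ => ?_)
    simp only [Function.comp]
    by_cases hk : 1 < List.count k ks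
    · have : (1 : Int) < (List.count k ks : Int) := by exact_mod_cast hk
      simp [hk, this]
    · have : ¬ (1 : Int) < (List.count k ks : Int) := by exact_mod_cast hk
      simp [hk, this]
  rw [hcg, PySem.List.sum_map_ite_one_zero]

-- run counting on a sorted list counts the distinct elements occurring more than once
lemma pvCountRuns_sorted_aux (n : Nat) : ∀ (l : List String), l.length ≤ n → l.Pairwise (· ≤ ·) →
    pvCountRuns l = ((PySem.Set.ofList l).countP (fun k => decide (1 < l.count k)) : Int) := by
  induction n with
  | zero =>
    intro l hl _
    have hnil : l = [] := List.eq_nil_of_length_eq_zero (Nat.le_zero.mp hl)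
    subst hnil
    simp [pvCountRuns]
  | succ n ih =>
    intro l hl hp
    cases l with
    | nil => simp [pvCountRuns]
    | cons x rest =>
      have hrt : rest.takeWhile (fun y => y == x) ++ rest.dropWhile (fun y => y == x) = rest :=
        List.takeWhile_append_dropWhile
      have hxle : ∀ y ∈ rest, x ≤ y := fun y hy => List.rel_of_pairwise_cons hp hy
      have hPairRest : rest.Pairwise (· ≤ ·) := (List.pairwise_cons.mp hp).2
      have hrP : (rest.dropWhile (fun y => y == x)).Pairwise (· ≤ ·) :=
        hPairRest.sublist (List.dropWhile_sublist _)
      have htx : ∀ y ∈ rest.takeWhile (fun y => y == x), y = x := fun y hy => by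
        have := List.mem_takeWhile_imp hy; simpa using this
      have hxr : ∀ y ∈ rest.dropWhile (fun y => y == x), x < y := by
        cases hcr : rest.dropWhile (fun y => y == x) with
        | nil => intro y hy; cases hy
        | cons z r' =>
          have hne : rest.dropWhile (fun y => y == x) ≠ [] := by simp [hcr]
          have hz := List.head_dropWhile_not (fun y => y == x) hne
          have hh? : (rest.dropWhile (fun y => y == x)).head? = some z := by rw [hcr]; rfl
          have hhead : (rest.dropWhile (fun y => y == x)).head hne = z := by
            have := List.head?_eq_some_head (l := rest.dropWhile (fun y => y == x)) hne
            rw [hh?] at this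
            exact (Option.some.inj this).symm
          rw [hhead] at hz
          have hzx : z ≠ x := by intro he; rw [he] at hz; simp at hz
          have hzmem : z ∈ rest := (List.dropWhile_sublist _).subset (by rw [hcr]; exact List.mem_cons_self ..)
          have hxz : x < z := lt_of_le_of_ne (hxle z hzmem) (Ne.symm hzx)
          intro y hy
          rcases List.mem_cons.mp hy with h1 | h1
          · exact h1 ▸ hxz
          · exact lt_of_lt_of_le hxz (List.rel_of_pairwise_cons (hcr ▸ hrP) h1)
      have hcount_x : List.count x (x :: rest) = 1 + (rest.takeWhile (fun y => y == x)).length := by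
        rw [List.count_cons_self]
        conv_lhs => rw [← hrt]
        rw [List.count_append]
        have h1 : List.count x (rest.takeWhile (fun y => y == x)) = (rest.takeWhile (fun y => y == x)).length :=
          List.count_eq_length.mpr (fun b hb => (htx b hb).symm)
        have h2 : List.count x (rest.dropWhile (fun y => y == x)) = 0 :=
          List.count_eq_zero.mpr (fun hx => lt_irrefl x (hxr x hx))
        omega
      have hcount_ne : ∀ k, k ≠ x → List.count k (x :: rest) = List.count k (rest.dropWhile (fun y => y == x)) := by
        intro k hk
        have h1 : List.count k (rest.takeWhile (fun y => y == x)) = 0 :=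
          List.count_eq_zero.mpr (fun hkm => hk (htx k hkm))
        have e1 : List.count k (x :: rest) = List.count k rest := by
          rw [List.count_cons]; simp [Ne.symm hk]
        rw [e1]
        conv_lhs => rw [← hrt]
        rw [List.count_append, h1, Nat.zero_add]
      have hmem : ∀ y, y ∈ (PySem.Set.ofList rest).discard x ↔ y ∈ PySem.Set.ofList (rest.dropWhile (fun y => y == x)) := by
        intro y
        rw [PySem.Set.mem_discard, PySem.Set.mem_ofList, PySem.Set.mem_ofList]
        constructor
        · rintro ⟨hy, hyx⟩
          rw [← hrt] at hy
          rcases List.mem_append.mp hy with h1 | h1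
          · exact absurd (htx y h1) hyx
          · exact h1
        · intro hy
          exact ⟨(List.dropWhile_sublist _).subset hy, (hxr y hy).ne'⟩
      have hpermD : ((PySem.Set.ofList rest).discard x).Perm (PySem.Set.ofList (rest.dropWhile (fun y => y == x))) :=
        (List.perm_ext_iff_of_nodup (PySem.Set.nodup_discard _ x (PySem.Set.nodup_ofList rest))
          (PySem.Set.nodup_ofList _)).mpr hmem
      have hIH : pvCountRuns (rest.dropWhile (fun y => y == x))
          = ((PySem.Set.ofList (rest.dropWhile (fun y => y == x))).countP
              (fun k => decide (1 < (rest.dropWhile (fun y => y == x)).count k)) : Int) := by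
        refine ih _ ?_ hrP
        calc (rest.dropWhile (fun y => y == x)).length ≤ rest.length := List.length_dropWhile_le _ _
          _ ≤ n := Nat.le_of_succ_le_succ hl
      have hPdiscard : ((PySem.Set.ofList rest).discard x).countP (fun k => decide (1 < List.count k (x :: rest)))
          = (PySem.Set.ofList (rest.dropWhile (fun y => y == x))).countP
              (fun k => decide (1 < (rest.dropWhile (fun y => y == x)).count k)) := by
        rw [hpermD.countP_eq]
        refine List.countP_congr (fun y hy => ?_)
        have hyr : y ∈ rest.dropWhile (fun y => y == x) := by
          simpa [PySem.Set.mem_ofList] using hy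
        rw [hcount_ne y (hxr y hyr).ne']
      rw [pvCountRuns, hIH, PySem.Set.ofList_cons, List.countP_cons, hPdiscard, hcount_x]
      simp only [decide_eq_true_eq]
      push_cast
      split_ifs <;> omega

lemma pvCountRuns_sorted (l : List String) (h : l.Pairwise (· ≤ ·)) :
    pvCountRuns l = ((PySem.Set.ofList l).countP (fun k => decide (1 < l.count k)) : Int) :=
  pvCountRuns_sorted_aux l.length l le_rfl h

-- both sides as a function of the key list
lemma pvMain (graph : List (List (String × String))) (f : List (String × String) → String) :
    ((graph.foldl (fun d edge =>
        if d.contains (f edge) then d.modify (f edge) 0 (· + 1) else d.insert (f edge) 1)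
        (PySem.Dict.empty : PySem.Dict String Int)).values.map (fun v => if v > 1 then (1 : Int) else 0)).sum
      = pvCountRuns (PySem.List.sorted (graph.map f) (fun x => x) false) := by
  have hfold : graph.foldl (fun d edge =>
      if d.contains (f edge) then d.modify (f edge) 0 (· + 1) else d.insert (f edge) 1)
      (PySem.Dict.empty : PySem.Dict String Int) = PySem.Dict.counter (graph.map f) := by
    rw [PySem.Dict.counter_eq_foldl, List.foldl_map]
    exact PySem.List.foldl_congr_mem _ _ _ _ (fun d e _ => pvStep_eq_modify d (f e))
  refine Eq.trans (congrArg (fun d : PySem.Dict String Int => (d.values.map (fun v => if v > 1 then (1 : Int) else 0)).sum) hfold) ?_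
  show ((PySem.Dict.counter (graph.map f)).values.map (fun v => if v > 1 then (1 : Int) else 0)).sum = _
  rw [pvA_eq_countP (graph.map f)]
  set ks := graph.map f with hks
  set s := PySem.List.sorted ks (fun x => x) false with hs
  have hperm : s.Perm ks := PySem.List.sorted_perm ks (fun x => x) false
  have hpair : s.Pairwise (· ≤ ·) := PySem.List.sorted_pairwise ks (fun x => x)
  rw [pvCountRuns_sorted s hpair]
  have hpermSet : (PySem.Set.ofList s).Perm (PySem.Set.ofList ks) := by
    rw [List.perm_ext_iff_of_nodup (PySem.Set.nodup_ofList s) (PySem.Set.nodup_ofList ks)]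
    intro a
    rw [PySem.Set.mem_ofList, PySem.Set.mem_ofList, hperm.mem_iff]
  have hc : (PySem.Set.ofList s).countP (fun k => decide (1 < s.count k))
      = (PySem.Set.ofList ks).countP (fun k => decide (1 < ks.count k)) := by
    rw [List.countP_congr (fun x _ => by rw [hperm.count_eq x])]
    exact hpermSet.countP_eq _
  rw [hc]

-- ===== VERDICT (by name: the statement is the Claim_ definition above) =====
theorem count_nodes_with_multiple_incoming_edges_spec : Claim_equal_count_nodes_with_multiple_incoming_edges := by
  intro graph _ _
  unfold Spec_count_nodes_with_multiple_incoming_edges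
  simp only [count_nodes_with_multiple_incoming_edges, count_nodes_with_multiple_incoming_edges_alt]
  exact pvMain graph (fun edge => get_key_from_node_to_avoid_order ((PySem.Dict.ofList edge).getD "to" ""))
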